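-- pv_equiv track=rewrite | github.com/abrar-aslam1/wedding-vendor-chronicles | scripts/python/instagram_scraper/enterprise_collection.py | determine_subcategory
-- ===== SOURCE A (Python) =====
-- from typing import Dict, List, Optional, Tuple
--
-- def determine_subcategory(bio: str, category: str) -> Optional[str]:
--     """Determine vendor subcategory based on bio content"""
--     bio_lower = bio.lower()
--
--     if category == 'makeup-artists':
--         if any(word in bio_lower for word in ['airbrush', 'hd makeup', 'hd foundation']):
--             return 'airbrush-specialist'
--         elif any(word in bio_lower for word in ['natural', 'organic', 'clean beauty']):
--             return 'natural-makeup'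
--         elif any(word in bio_lower for word in ['glam', 'glamour', 'dramatic']):
--             return 'glam-specialist'
--         elif any(word in bio_lower for word in ['traditional', 'cultural', 'asian', 'indian', 'mexican']):
--             return 'cultural-specialist'
--
--     elif category == 'hair-stylists':
--         if any(word in bio_lower for word in ['updo', 'updos', 'bridal updo']):
--             return 'updo-specialist'
--         elif any(word in bio_lower for word in ['extensions', 'hair extensions']):
--             return 'extensions-specialist'
--         elif any(word in bio_lower for word in ['color', 'colorist', 'balayage']):
--             return 'color-specialist'
--         elif any(word in bio_lower for word in ['natural hair', 'textured hair', 'curly']):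
--             return 'textured-hair-specialist'
--
--     return None
-- ===== SOURCE B (Python) =====
-- # Flat keyword->priority table; pick the lowest-rank keyword that occurs in the bio.
-- # Correct because A returns the first rule (in rule order) with a matching keyword,
-- # which is exactly the minimum rank over all matching keywords.
-- KEYWORDS = {
--     'makeup-artists': [
--         ('airbrush', 0, 'airbrush-specialist'),
--         ('hd makeup', 0, 'airbrush-specialist'),
--         ('hd foundation', 0, 'airbrush-specialist'),
--         ('natural', 1, 'natural-makeup'),
--         ('organic', 1, 'natural-makeup'),
--         ('clean beauty', 1, 'natural-makeup'),
--         ('glam', 2, 'glam-specialist'),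
--         ('glamour', 2, 'glam-specialist'),
--         ('dramatic', 2, 'glam-specialist'),
--         ('traditional', 3, 'cultural-specialist'),
--         ('cultural', 3, 'cultural-specialist'),
--         ('asian', 3, 'cultural-specialist'),
--         ('indian', 3, 'cultural-specialist'),
--         ('mexican', 3, 'cultural-specialist'),
--     ],
--     'hair-stylists': [
--         ('updo', 0, 'updo-specialist'),
--         ('updos', 0, 'updo-specialist'),
--         ('bridal updo', 0, 'updo-specialist'),
--         ('extensions', 1, 'extensions-specialist'),
--         ('hair extensions', 1, 'extensions-specialist'),
--         ('color', 2, 'color-specialist'),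
--         ('colorist', 2, 'color-specialist'),
--         ('balayage', 2, 'color-specialist'),
--         ('natural hair', 3, 'textured-hair-specialist'),
--         ('textured hair', 3, 'textured-hair-specialist'),
--         ('curly', 3, 'textured-hair-specialist'),
--     ],
-- }
--
--
-- def determine_subcategory(bio, category):
--     bio_lower = bio.lower()
--     best = None
--     for kw, rank, label in KEYWORDS.get(category, []):
--         if kw in bio_lower and (best is None or rank < best[0]):
--             best = (rank, label)
--     return None if best is None else best[1]
-- ===== Notes on version B (the rewrite author's own statement) =====
-- stated objective: alternative
-- what changed: Replaces the ordered if/elif groups with early return by a single accumulator scan over a flat keyword->(rank,label) priority table that keeps the lowest-rank matching keyword; first matching rule = minimum rank among matching keywords.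
import Mathlib
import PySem

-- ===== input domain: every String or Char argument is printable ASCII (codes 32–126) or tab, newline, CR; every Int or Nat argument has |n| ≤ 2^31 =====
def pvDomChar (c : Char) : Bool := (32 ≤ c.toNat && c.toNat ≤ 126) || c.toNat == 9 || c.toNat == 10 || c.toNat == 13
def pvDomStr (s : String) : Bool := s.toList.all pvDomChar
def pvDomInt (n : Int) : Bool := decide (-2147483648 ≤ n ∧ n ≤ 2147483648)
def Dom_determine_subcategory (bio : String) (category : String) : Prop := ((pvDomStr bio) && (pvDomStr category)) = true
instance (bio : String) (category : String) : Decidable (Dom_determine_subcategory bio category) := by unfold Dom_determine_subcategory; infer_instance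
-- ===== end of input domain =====

-- B replaces A's if/elif cascade with early return by a min-rank accumulator scan over a flat keyword→(rank,label) table (alternative; same cost).

-- ===== PORT A =====
def determine_subcategory (bio : String) (category : String) : Option String :=
  let bio_lower := PySem.Str.lower bio
  if category == "makeup-artists" then
    if (["airbrush", "hd makeup", "hd foundation"] : List String).any (fun word => PySem.Str.isIn word bio_lower) then
      some "airbrush-specialist"
    else if (["natural", "organic", "clean beauty"] : List String).any (fun word => PySem.Str.isIn word bio_lower) then
      some "natural-makeup"
    else if (["glam", "glamour", "dramatic"] : List String).any (fun word => PySem.Str.isIn word bio_lower) then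
      some "glam-specialist"
    else if (["traditional", "cultural", "asian", "indian", "mexican"] : List String).any (fun word => PySem.Str.isIn word bio_lower) then
      some "cultural-specialist"
    else none
  else if category == "hair-stylists" then
    if (["updo", "updos", "bridal updo"] : List String).any (fun word => PySem.Str.isIn word bio_lower) then
      some "updo-specialist"
    else if (["extensions", "hair extensions"] : List String).any (fun word => PySem.Str.isIn word bio_lower) then
      some "extensions-specialist"
    else if (["color", "colorist", "balayage"] : List String).any (fun word => PySem.Str.isIn word bio_lower) then
      some "color-specialist"
    else if (["natural hair", "textured hair", "curly"] : List String).any (fun word => PySem.Str.isIn word bio_lower) then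
      some "textured-hair-specialist"
    else none
  else none

-- ===== PORT B =====
-- the module-level flat KEYWORDS table of Source B: keyword, rank, label
def pvKeywords : PySem.Dict String (List (String × Nat × String)) :=
  PySem.Dict.ofList
    [ ("makeup-artists",
        [ ("airbrush", 0, "airbrush-specialist")
        , ("hd makeup", 0, "airbrush-specialist")
        , ("hd foundation", 0, "airbrush-specialist")
        , ("natural", 1, "natural-makeup")
        , ("organic", 1, "natural-makeup")
        , ("clean beauty", 1, "natural-makeup")
        , ("glam", 2, "glam-specialist")
        , ("glamour", 2, "glam-specialist")
        , ("dramatic", 2, "glam-specialist")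
        , ("traditional", 3, "cultural-specialist")
        , ("cultural", 3, "cultural-specialist")
        , ("asian", 3, "cultural-specialist")
        , ("indian", 3, "cultural-specialist")
        , ("mexican", 3, "cultural-specialist") ])
    , ("hair-stylists",
        [ ("updo", 0, "updo-specialist")
        , ("updos", 0, "updo-specialist")
        , ("bridal updo", 0, "updo-specialist")
        , ("extensions", 1, "extensions-specialist")
        , ("hair extensions", 1, "extensions-specialist")
        , ("color", 2, "color-specialist")
        , ("colorist", 2, "color-specialist")
        , ("balayage", 2, "color-specialist")
        , ("natural hair", 3, "textured-hair-specialist")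
        , ("textured hair", 3, "textured-hair-specialist")
        , ("curly", 3, "textured-hair-specialist") ]) ]

-- one iteration of Source B's loop body: keep the lowest-rank matching keyword
def pvStep (bl : String) (best : Option (Nat × String)) (x : String × Nat × String) : Option (Nat × String) :=
  if PySem.Str.isIn x.1 bl && (match best with | none => true | some (r, _) => decide (x.2.1 < r)) then
    some x.2
  else best

def determine_subcategory_alt (bio : String) (category : String) : Option String :=
  let bio_lower := PySem.Str.lower bio
  match (PySem.Dict.getD pvKeywords category []).foldl (pvStep bio_lower) none with
  | none => none
  | some (_, l) => some l

-- ===== PRECONDITION & SPEC =====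
def Spec_determine_subcategory (bio : String) (category : String) (out : Option String) : Prop := out = determine_subcategory_alt bio category
instance (bio : String) (category : String) (out : Option String) : Decidable (Spec_determine_subcategory bio category out) := by unfold Spec_determine_subcategory; infer_instance

-- ===== CLAIM =====
def Claim_equal_determine_subcategory : Prop := ∀ (bio : String) (category : String), Dom_determine_subcategory bio category → Spec_determine_subcategory bio category (determine_subcategory bio category)

-- ===== LEMMAS AND PROOFS =====

-- once the accumulator holds a rank ≤ every remaining rank, the fold leaves it unchanged
lemma fold_skip (bl : String) (k : Nat) (l : String) (rest : List (String × Nat × String))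
    (h : ∀ x ∈ rest, k ≤ x.2.1) :
    rest.foldl (pvStep bl) (some (k, l)) = some (k, l) := by
  induction rest with
  | nil => rfl
  | cons x xs ih =>
      have hx : k ≤ x.2.1 := h x (List.mem_cons_self)
      have hlt : decide (x.2.1 < k) = false := by simp; omega
      simp only [List.foldl_cons, pvStep, hlt, Bool.and_false, Bool.false_eq_true, if_false]
      exact ih (fun y hy => h y (List.mem_cons_of_mem _ hy))

-- a rule group with a matching keyword resolves the whole fold to its (rank,label)
lemma fold_hit (bl : String) (kws : List String) (k : Nat) (l : String)
    (rest : List (String × Nat × String))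
    (hmatch : kws.any (fun w => PySem.Str.isIn w bl) = true)
    (hrest : ∀ x ∈ rest, k ≤ x.2.1) :
    (kws.map (fun w => (w, k, l)) ++ rest).foldl (pvStep bl) none = some (k, l) := by
  induction kws with
  | nil => simp at hmatch
  | cons w ws ih =>
      by_cases hw : PySem.Str.isIn w bl = true
      · simp only [List.map_cons, List.cons_append, List.foldl_cons, pvStep, hw, Bool.true_and,
          if_true]
        apply fold_skip
        intro x hx
        rcases List.mem_append.mp hx with hx | hx
        · rcases List.mem_map.mp hx with ⟨w', _, rfl⟩; exact le_refl k
        · exact hrest x hx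
      · have hw' : PySem.Str.isIn w bl = false := by simpa using hw
        have hmatch' : ws.any (fun w => PySem.Str.isIn w bl) = true := by
          simp only [List.any_cons, hw', Bool.false_or] at hmatch
          exact hmatch
        simp only [List.map_cons, List.cons_append, List.foldl_cons, pvStep, hw', Bool.false_and,
          Bool.false_eq_true, if_false]
        exact ih hmatch'

-- a rule group with no matching keyword is passed over with the accumulator still none
lemma fold_miss (bl : String) (kws : List String) (k : Nat) (l : String)
    (rest : List (String × Nat × String))
    (hmatch : kws.any (fun w => PySem.Str.isIn w bl) = false) :
    (kws.map (fun w => (w, k, l)) ++ rest).foldl (pvStep bl) none =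
      rest.foldl (pvStep bl) none := by
  induction kws with
  | nil => rfl
  | cons w ws ih =>
      have hw : PySem.Str.isIn w bl = false := by
        rcases List.any_eq_false.mp hmatch w List.mem_cons_self with h
        simpa using h
      have hmatch' : ws.any (fun w => PySem.Str.isIn w bl) = false := by
        apply List.any_eq_false.mpr
        intro y hy
        exact List.any_eq_false.mp hmatch y (List.mem_cons_of_mem _ hy)
      simp only [List.map_cons, List.cons_append, List.foldl_cons, pvStep, hw, Bool.false_and,
        Bool.false_eq_true, if_false]
      exact ih hmatch'

-- ===== VERDICT =====
theorem determine_subcategory_spec : Claim_equal_determine_subcategory := by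
  intro bio category _
  unfold Spec_determine_subcategory determine_subcategory determine_subcategory_alt
  set bl := PySem.Str.lower bio with hbl
  by_cases h1 : category = "makeup-artists"
  · subst h1
    have hg : PySem.Dict.getD pvKeywords "makeup-artists" [] =
        ((["airbrush", "hd makeup", "hd foundation"] : List String).map
            (fun w => (w, 0, "airbrush-specialist")) ++
          ((["natural", "organic", "clean beauty"] : List String).map
            (fun w => (w, 1, "natural-makeup")) ++
          ((["glam", "glamour", "dramatic"] : List String).map
            (fun w => (w, 2, "glam-specialist")) ++
          ((["traditional", "cultural", "asian", "indian", "mexican"] : List String).map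
            (fun w => (w, 3, "cultural-specialist")) ++
          ([] : List (String × Nat × String)))))) := by decide
    simp only [beq_self_eq_true, if_true, hg]
    by_cases g1 : (["airbrush", "hd makeup", "hd foundation"] : List String).any
        (fun word => PySem.Str.isIn word bl) = true
    · rw [fold_hit bl _ 0 _ _ g1 (by intro x hx; exact Nat.zero_le _), g1]; rfl
    · have g1' := eq_false_of_ne_true g1
      rw [fold_miss bl _ 0 _ _ g1', g1']
      by_cases g2 : (["natural", "organic", "clean beauty"] : List String).any
          (fun word => PySem.Str.isIn word bl) = true
      · rw [fold_hit bl _ 1 _ _ g2 (by simp), g2]; rfl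
      · have g2' := eq_false_of_ne_true g2
        rw [fold_miss bl _ 1 _ _ g2', g2']
        by_cases g3 : (["glam", "glamour", "dramatic"] : List String).any
            (fun word => PySem.Str.isIn word bl) = true
        · rw [fold_hit bl _ 2 _ _ g3 (by simp), g3]; rfl
        · have g3' := eq_false_of_ne_true g3
          rw [fold_miss bl _ 2 _ _ g3', g3']
          by_cases g4 : (["traditional", "cultural", "asian", "indian", "mexican"] : List String).any
              (fun word => PySem.Str.isIn word bl) = true
          · rw [fold_hit bl _ 3 _ _ g4 (by simp), g4]; rfl
          · have g4' := eq_false_of_ne_true g4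
            rw [fold_miss bl _ 3 _ _ g4', g4']
            rfl
  · by_cases h2 : category = "hair-stylists"
    · subst h2
      have hne : ("hair-stylists" == "makeup-artists") = false := by decide
      have hg : PySem.Dict.getD pvKeywords "hair-stylists" [] =
          ((["updo", "updos", "bridal updo"] : List String).map
              (fun w => (w, 0, "updo-specialist")) ++
            ((["extensions", "hair extensions"] : List String).map
              (fun w => (w, 1, "extensions-specialist")) ++
            ((["color", "colorist", "balayage"] : List String).map
              (fun w => (w, 2, "color-specialist")) ++
            ((["natural hair", "textured hair", "curly"] : List String).map
              (fun w => (w, 3, "textured-hair-specialist")) ++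
            ([] : List (String × Nat × String)))))) := by decide
      simp only [hne, Bool.false_eq_true, if_false, beq_self_eq_true, if_true, hg]
      by_cases g1 : (["updo", "updos", "bridal updo"] : List String).any
          (fun word => PySem.Str.isIn word bl) = true
      · rw [fold_hit bl _ 0 _ _ g1 (by intro x hx; exact Nat.zero_le _), g1]; rfl
      · have g1' := eq_false_of_ne_true g1
        rw [fold_miss bl _ 0 _ _ g1', g1']
        by_cases g2 : (["extensions", "hair extensions"] : List String).any
            (fun word => PySem.Str.isIn word bl) = true
        · rw [fold_hit bl _ 1 _ _ g2 (by simp), g2]; rfl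
        · have g2' := eq_false_of_ne_true g2
          rw [fold_miss bl _ 1 _ _ g2', g2']
          by_cases g3 : (["color", "colorist", "balayage"] : List String).any
              (fun word => PySem.Str.isIn word bl) = true
          · rw [fold_hit bl _ 2 _ _ g3 (by simp), g3]; rfl
          · have g3' := eq_false_of_ne_true g3
            rw [fold_miss bl _ 2 _ _ g3', g3']
            by_cases g4 : (["natural hair", "textured hair", "curly"] : List String).any
                (fun word => PySem.Str.isIn word bl) = true
            · rw [fold_hit bl _ 3 _ _ g4 (by simp), g4]; rfl
            · have g4' := eq_false_of_ne_true g4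
              rw [fold_miss bl _ 3 _ _ g4', g4']
              rfl
    · have hc : PySem.Dict.getD pvKeywords category [] = [] := by
        rw [PySem.Dict.getD_of_not_contains]
        rw [PySem.Dict.contains_eq_decide_mem_keys]
        have hk : pvKeywords.keys = ["makeup-artists", "hair-stylists"] := by decide
        simp [hk, h1, h2]
      have hne1 : (category == "makeup-artists") = false := by simp [h1]
      have hne2 : (category == "hair-stylists") = false := by simp [h2]
      simp only [hne1, hne2, Bool.false_eq_true, if_false, hc, List.foldl_nil]
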